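-- pv_equiv track=rewrite | github.com/xiaojingxx/service-deck-builder | app.py | preview_stats
-- ===== SOURCE A (Python) =====
-- def preview_stats(images):
--     if not images:
--         return {
--             "count": 0,
--             "total_bytes": 0,
--             "avg_bytes": 0,
--             "max_bytes": 0,
--         }
--
--     sizes = [len(img) for img in images]
--     total = sum(sizes)
--
--     return {
--         "count": len(images),
--         "total_bytes": total,
--         "avg_bytes": total // len(images),
--         "max_bytes": max(sizes),
--     }
-- ===== SOURCE B (Python) =====
-- def preview_stats(images):
--     if not images:
--         return {
--             "count": 0,
--             "total_bytes": 0,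
--             "avg_bytes": 0,
--             "max_bytes": 0,
--         }
--     count, total, mx = _stats(images)
--     return {
--         "count": count,
--         "total_bytes": total,
--         "avg_bytes": total // count,
--         "max_bytes": mx,
--     }
--
-- def _stats(chunk):
--     # divide and conquer: merge the (count, total, max) triples of the halves
--     if len(chunk) == 1:
--         n = len(chunk[0])
--         return 1, n, n
--     mid = len(chunk) // 2
--     c1, t1, m1 = _stats(chunk[:mid])
--     c2, t2, m2 = _stats(chunk[mid:])
--     return c1 + c2, t1 + t2, m1 if m1 >= m2 else m2
-- ===== Notes on version B (the rewrite author's own statement) =====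
-- stated objective: alternative
-- what changed: Replaces the sizes list with its three separate linear traversals (comprehension, sum, max) by a divide-and-conquer recursion that splits the list in halves and merges (count, total, max) triples.
import Mathlib
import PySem

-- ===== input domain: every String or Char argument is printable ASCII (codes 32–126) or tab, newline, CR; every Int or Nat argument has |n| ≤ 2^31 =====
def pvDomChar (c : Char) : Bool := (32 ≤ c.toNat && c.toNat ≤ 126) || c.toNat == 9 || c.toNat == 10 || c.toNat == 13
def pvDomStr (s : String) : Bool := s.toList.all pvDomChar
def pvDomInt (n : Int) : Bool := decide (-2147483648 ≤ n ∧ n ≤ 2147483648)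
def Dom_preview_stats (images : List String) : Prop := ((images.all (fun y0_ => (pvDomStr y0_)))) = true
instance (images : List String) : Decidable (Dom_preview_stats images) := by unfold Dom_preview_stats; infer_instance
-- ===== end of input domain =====

-- B replaces A's staged passes (size comprehension, sum, max) by a divide-and-conquer recursion merging (count, total, max) triples of halves; return-value equivalence proved below.

-- ===== PORT A =====
def preview_stats (images : List String) : List (String × Int) :=
  if images = [] then
    [("count", 0), ("total_bytes", 0), ("avg_bytes", 0), ("max_bytes", 0)]
  else
    let sizes := images.map (fun img => PySem.Str.len img)
    let total := sizes.sum
    [("count", (images.length : Int)),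
     ("total_bytes", total),
     ("avg_bytes", PySem.Int.floordiv total (images.length : Int)),
     ("max_bytes", (PySem.List.max? sizes (fun x => x)).getD 0)]

-- ===== PORT B =====
-- port of Source B's _stats; the [] case is a totality guard only (B never calls _stats on []);
-- chunk[:mid] / chunk[mid:] with 0 ≤ mid ≤ len are exactly take/drop (PySem.List.slice_to / slice_from)
def pvStats : List String → Int × Int × Int
  | [] => (0, 0, 0)
  | [x] => (1, PySem.Str.len x, PySem.Str.len x)
  | x :: y :: rest =>
    let chunk := x :: y :: rest
    let mid : Nat := chunk.length / 2
    let s1 := pvStats (chunk.take mid)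
    let s2 := pvStats (chunk.drop mid)
    (s1.1 + s2.1, s1.2.1 + s2.2.1, if s1.2.2 ≥ s2.2.2 then s1.2.2 else s2.2.2)
termination_by l => l.length
decreasing_by
  · simp; omega
  · simp; omega

def preview_stats_alt (images : List String) : List (String × Int) :=
  if images = [] then
    [("count", 0), ("total_bytes", 0), ("avg_bytes", 0), ("max_bytes", 0)]
  else
    let s := pvStats images
    [("count", s.1),
     ("total_bytes", s.2.1),
     ("avg_bytes", PySem.Int.floordiv s.2.1 s.1),
     ("max_bytes", s.2.2)]

-- ===== PRECONDITION & SPEC =====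
def Spec_preview_stats (images : List String) (out : List (String × Int)) : Prop := out = preview_stats_alt images
instance (images : List String) (out : List (String × Int)) : Decidable (Spec_preview_stats images out) := by unfold Spec_preview_stats; infer_instance

-- ===== CLAIM =====
def Claim_equal_preview_stats : Prop := ∀ (images : List String), Dom_preview_stats images → Spec_preview_stats images (preview_stats images)

-- ===== LEMMAS AND PROOFS =====

theorem pv_len_nonneg (s : String) : 0 ≤ PySem.Str.len s := by
  simp [PySem.Str.len_eq]

theorem pv_foldl_max_init (l : List Int) (a b : Int) :
    l.foldl max (max a b) = max a (l.foldl max b) := by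
  induction l generalizing b with
  | nil => simp
  | cons x xs ih => simp only [List.foldl_cons, max_assoc, ih]

theorem pv_foldl_max_nonneg (l : List Int) (h : ∀ x ∈ l, 0 ≤ x) : 0 ≤ l.foldl max 0 := by
  induction l with
  | nil => simp
  | cons x xs ih =>
    simp only [List.foldl_cons]
    rw [pv_foldl_max_init xs 0 x]
    exact le_max_left _ _

-- characterisation of the divide-and-conquer: count, total and running max over sizes
theorem pvStats_eq (l : List String) (h : l ≠ []) :
    pvStats l = ((l.length : Int), (l.map PySem.Str.len).sum,
                 (l.map PySem.Str.len).foldl max 0) := by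
  induction l using pvStats.induct with
  | case1 => exact absurd rfl h
  | case2 x =>
    simp [pvStats]
  | case3 x y rest c mid ih1 ih2 =>
    have hc : c = x :: y :: rest := rfl
    have hm : mid = c.length / 2 := rfl
    have hlen : c.length = rest.length + 2 := by rw [hc]; simp
    have hmid : 1 ≤ mid := by rw [hm]; omega
    have hmid2 : mid < c.length := by rw [hm]; omega
    have htne : c.take mid ≠ [] := by
      intro hnil
      have := congrArg List.length hnil
      simp [List.length_take] at this
      omega
    have hdne : c.drop mid ≠ [] := by
      intro hnil
      have := congrArg List.length hnil
      simp [List.length_drop] at this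
      omega
    rw [pvStats]
    simp only [← hc, ← hm]
    rw [ih1 htne, ih2 hdne]
    have hsplit : c.take mid ++ c.drop mid = c := List.take_append_drop mid c
    have hlensum : ((c.take mid).length : Int) + ((c.drop mid).length : Int) = (c.length : Int) := by
      have := congrArg List.length hsplit
      simp only [List.length_append] at this
      push_cast [← this]; ring
    have hmapapp : (c.take mid).map PySem.Str.len ++ (c.drop mid).map PySem.Str.len = c.map PySem.Str.len := by
      rw [← List.map_append, hsplit]
    have hA : 0 ≤ ((c.take mid).map PySem.Str.len).foldl max 0 :=
      pv_foldl_max_nonneg _ (by intro z hz; obtain ⟨s, _, rfl⟩ := List.mem_map.mp hz; exact pv_len_nonneg s)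
    have happ : (c.map PySem.Str.len).foldl max 0
        = max (((c.take mid).map PySem.Str.len).foldl max 0)
              (((c.drop mid).map PySem.Str.len).foldl max 0) := by
      rw [← hmapapp, List.foldl_append]
      conv_lhs => rw [show ((c.take mid).map PySem.Str.len).foldl max 0
        = max (((c.take mid).map PySem.Str.len).foldl max 0) 0 from (max_eq_left hA).symm]
      exact pv_foldl_max_init _ _ _
    have hsum : ((c.take mid).map PySem.Str.len).sum + ((c.drop mid).map PySem.Str.len).sum
        = (c.map PySem.Str.len).sum := by
      rw [← hmapapp, List.sum_append]
    simp only [Prod.mk.injEq]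
    refine ⟨hlensum, hsum, ?_⟩
    rw [happ]
    split <;> omega

theorem pv_max_eq (x : String) (xs : List String) :
    ((PySem.List.max? ((x :: xs).map PySem.Str.len) (fun y => y)).getD 0)
      = ((x :: xs).map PySem.Str.len).foldl max 0 := by
  simp only [List.map_cons]
  rw [PySem.List.max?_id_cons]
  simp only [Option.getD_some, List.foldl_cons]
  rw [max_eq_right (pv_len_nonneg x)]

-- ===== VERDICT =====
theorem preview_stats_spec : Claim_equal_preview_stats := by
  intro images _
  unfold Spec_preview_stats preview_stats preview_stats_alt
  cases images with
  | nil => simp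
  | cons x xs =>
    simp only [if_neg (List.cons_ne_nil x xs)]
    rw [pvStats_eq (x :: xs) (List.cons_ne_nil x xs), pv_max_eq x xs]
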